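-- pv_equiv track=rewrite | github.com/ahom/binr | binr/types.py | decompress_half
-- ===== SOURCE A (Python) =====
-- def decompress_half(val):
--     s = int((val >> 15) & 0x00000001)    # sign
--     e = int((val >> 10) & 0x0000001f)    # exponent
--     f = int(val & 0x000003ff)            # fraction
--
--     if e == 0:
--         if f == 0:
--             return int(s << 31)
--         else:
--             while not (f & 0x00000400):
--                 f = f << 1
--                 e -= 1
--             e += 1
--             f &= ~0x00000400
--     elif e == 31:
--         if f == 0:
--             return int((s << 31) | 0x7f800000)
--         else:
--             return int((s << 31) | 0x7f800000 | (f << 13))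
--
--     e = e + (127 -15)
--     f = f << 13
--     return int((s << 31) | (e << 23) | f)
-- ===== SOURCE B (Python) =====
-- def decompress_half(val):
--     s = (val >> 15) & 0x1          # sign
--     e = (val >> 10) & 0x1f         # exponent
--     f = val & 0x3ff                # fraction
--     if e == 31:                    # inf / nan
--         if f == 0:
--             return (s << 31) | 0x7f800000
--         return (s << 31) | 0x7f800000 | (f << 13)
--     if e == 0:
--         if f == 0:                 # signed zero
--             return s << 31
--         # subnormal: normalize with a direct highest-set-bit computation
--         n = f.bit_length()         # 1..10
--         e = n - 10
--         f = (f << (11 - n)) & 0x3ff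
--     return (s << 31) | ((e + 112) << 23) | (f << 13)
-- ===== Notes on version B (the rewrite author's own statement) =====
-- stated objective: simpler
-- what changed: The subnormal-normalization while-loop is replaced by a closed form using f.bit_length() (exponent n-10, fraction (f<<(11-n)) & 0x3ff), and the branches are restructured around one shared assembly tail.
import Mathlib
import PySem

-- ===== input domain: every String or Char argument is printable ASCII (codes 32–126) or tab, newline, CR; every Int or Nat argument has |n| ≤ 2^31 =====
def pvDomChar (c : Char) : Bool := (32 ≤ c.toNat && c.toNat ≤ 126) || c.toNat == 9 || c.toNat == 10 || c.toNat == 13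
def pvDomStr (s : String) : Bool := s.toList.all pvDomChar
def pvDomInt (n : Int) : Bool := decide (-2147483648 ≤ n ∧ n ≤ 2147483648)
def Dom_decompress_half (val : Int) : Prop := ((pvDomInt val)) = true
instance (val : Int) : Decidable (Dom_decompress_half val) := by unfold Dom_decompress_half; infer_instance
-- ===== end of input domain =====

-- B replaces A's subnormal while-loop normalization by a bit_length closed form (objective: simpler).

-- ===== PORT A =====
-- the 'while not (f & 0x400)' loop; fuel 11 only makes it total (f ∈ 1..0x3ff needs ≤ 10 iterations)
def dhLoopA : Nat → Int → Int → Int × Int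
  | 0, f, e => (f, e)
  | fuel + 1, f, e =>
      if PySem.Int.band f 1024 = 0 then dhLoopA fuel (f <<< 1) (e - 1) else (f, e)

def decompress_half (val : Int) : Int :=
  let s := PySem.Int.band (val >>> 15) 1
  let e := PySem.Int.band (val >>> 10) 31
  let f := PySem.Int.band val 1023
  if e = 0 then
    if f = 0 then s <<< 31
    else
      let fe := dhLoopA 11 f e
      let e1 := fe.2 + 1
      let f2 := PySem.Int.band fe.1 (Int.not 1024)
      let e2 := e1 + 112
      let f3 := f2 <<< 13
      PySem.Int.bor (PySem.Int.bor (s <<< 31) (e2 <<< 23)) f3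
  else if e = 31 then
    if f = 0 then PySem.Int.bor (s <<< 31) 2139095040
    else PySem.Int.bor (PySem.Int.bor (s <<< 31) 2139095040) (f <<< 13)
  else
    let e2 := e + 112
    let f3 := f <<< 13
    PySem.Int.bor (PySem.Int.bor (s <<< 31) (e2 <<< 23)) f3

-- ===== PORT B =====
def decompress_half_alt (val : Int) : Int :=
  let s := PySem.Int.band (val >>> 15) 1
  let e := PySem.Int.band (val >>> 10) 31
  let f := PySem.Int.band val 1023
  if e = 31 then
    if f = 0 then PySem.Int.bor (s <<< 31) 2139095040
    else PySem.Int.bor (PySem.Int.bor (s <<< 31) 2139095040) (f <<< 13)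
  else if e = 0 then
    if f = 0 then s <<< 31
    else
      let n := PySem.Int.bitLength f
      let e' := (n : Int) - 10
      let f' := PySem.Int.band (f <<< (11 - n)) 1023
      PySem.Int.bor (PySem.Int.bor (s <<< 31) ((e' + 112) <<< 23)) (f' <<< 13)
  else
    PySem.Int.bor (PySem.Int.bor (s <<< 31) ((e + 112) <<< 23)) (f <<< 13)

-- ===== PRECONDITION & SPEC =====
def Spec_decompress_half (val : Int) (out : Int) : Prop := out = decompress_half_alt val
instance (val : Int) (out : Int) : Decidable (Spec_decompress_half val out) := by unfold Spec_decompress_half; infer_instance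

-- ===== CLAIM (what is proved, stated in full; the proofs are below) =====
def Claim_equal_decompress_half : Prop := ∀ (val : Int), Dom_decompress_half val → Spec_decompress_half val (decompress_half val)

-- ===== LEMMAS AND PROOFS =====

-- masking with 0x3ff yields a value in [0, 1023]
lemma band_1023_bounds (a : Int) :
    0 ≤ PySem.Int.band a 1023 ∧ PySem.Int.band a 1023 ≤ 1023 := by
  unfold PySem.Int.band
  split_ifs with h1 h2 h3 <;> first
  | (constructor
     · positivity
     · have h := Nat.and_le_right (n := a.toNat) (m := (1023 : Int).toNat)
       omega)
  | omega

set_option maxHeartbeats 2000000 in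
set_option maxRecDepth 16384 in
-- the loop's exponent/fraction agree with the bit_length closed form for every f in 1..1023
lemma dh_key : ∀ fn : Nat, fn < 1024 → fn ≠ 0 →
    (dhLoopA 11 (fn : Int) 0).2 + 1 = ((PySem.Int.bitLength (fn : Int) : Int) - 10)
    ∧ PySem.Int.band (dhLoopA 11 (fn : Int) 0).1 (Int.not 1024)
      = PySem.Int.band ((fn : Int) <<< (11 - PySem.Int.bitLength (fn : Int))) 1023 := by
  decide

-- ===== VERDICT (by name: the statement is the Claim_ definition above) =====
theorem decompress_half_spec : Claim_equal_decompress_half := by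
  intro val _
  show decompress_half val = decompress_half_alt val
  simp only [decompress_half, decompress_half_alt]
  split_ifs with h1 h2 h3 h4 <;> try (first | rfl | omega)
  · -- e = 0, f ≠ 0: the loop vs. the closed form
    rw [h1]
    obtain ⟨hf0, hf1⟩ := band_1023_bounds val
    have hfn : PySem.Int.band val 1023 = ((PySem.Int.band val 1023).toNat : Int) :=
      (Int.toNat_of_nonneg hf0).symm
    rw [hfn]
    obtain ⟨k1, k2⟩ := dh_key (PySem.Int.band val 1023).toNat (by omega) (by omega)
    rw [k1, k2]
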